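-- pv_equiv track=rewrite | github.com/CheezBallzPi/rpibuttons | quickthumb.py | map_ms_to_n
-- ===== SOURCE A (Python) =====
-- def map_ms_to_n(ms):
--     ranking = [110, 120, 130, 150,
--                180, 190, 230, 250]
--     n = 1
--     for interval in ranking:
--         if ms < interval:
--             return n
--         else:
--             n += 1
--     return n
-- ===== SOURCE B (Python) =====
-- import bisect
--
-- def map_ms_to_n(ms):
--     ranking = [110, 120, 130, 150,
--                180, 190, 230, 250]
--     return bisect.bisect_right(ranking, ms) + 1
-- ===== Notes on version B (the rewrite author's own statement) =====
-- stated objective: idiomatic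
-- what changed: Replaces the explicit linear early-return loop with a stdlib binary search: bisect_right counts the thresholds not exceeding ms, and the rank is the successor of that count.
import Mathlib
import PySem

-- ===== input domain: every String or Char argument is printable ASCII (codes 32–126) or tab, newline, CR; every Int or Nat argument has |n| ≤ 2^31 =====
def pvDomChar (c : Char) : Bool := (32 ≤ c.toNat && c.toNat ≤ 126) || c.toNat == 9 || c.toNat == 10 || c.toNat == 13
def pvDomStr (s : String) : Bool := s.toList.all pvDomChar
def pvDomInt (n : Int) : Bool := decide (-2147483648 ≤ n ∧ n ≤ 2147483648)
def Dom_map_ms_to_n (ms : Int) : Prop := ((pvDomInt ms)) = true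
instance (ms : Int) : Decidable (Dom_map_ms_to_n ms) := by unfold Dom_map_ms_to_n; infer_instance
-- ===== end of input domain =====

-- B replaces A's linear early-return scan with a binary search (bisect_right) over the same thresholds; idiomatic, same results.


-- ===== PORT A =====
-- A's loop: walk the ranking, returning n at the first interval with ms < interval, else n+1.
def mapMsLoop (ms : Int) : List Int → Int → Int
  | [], n => n
  | interval :: rest, n => if ms < interval then n else mapMsLoop ms rest (n + 1)

def map_ms_to_n (ms : Int) : Int :=
  mapMsLoop ms [110, 120, 130, 150, 180, 190, 230, 250] 1

-- ===== PORT B =====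
-- Transliteration of CPython's bisect.bisect_right while-loop (lo/hi halving).
def bisectRight (a : List Int) (x : Int) (lo hi : Nat) : Nat :=
  if _h : lo < hi then
    let mid := (lo + hi) / 2
    if x < a.getD mid 0 then bisectRight a x lo mid
    else bisectRight a x (mid + 1) hi
  else lo
termination_by hi - lo
decreasing_by all_goals omega

def map_ms_to_n_alt (ms : Int) : Int :=
  (bisectRight [110, 120, 130, 150, 180, 190, 230, 250] ms 0 8 : Int) + 1

-- ===== PRECONDITION & SPEC =====
def Spec_map_ms_to_n (ms : Int) (out : Int) : Prop := out = map_ms_to_n_alt ms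
instance (ms : Int) (out : Int) : Decidable (Spec_map_ms_to_n ms out) := by unfold Spec_map_ms_to_n; infer_instance

-- ===== CLAIM (what is proved, stated in full; the proofs are below) =====
def Claim_equal_map_ms_to_n : Prop := ∀ (ms : Int), Dom_map_ms_to_n ms → Spec_map_ms_to_n ms (map_ms_to_n ms)

-- ===== LEMMAS AND PROOFS =====

theorem bisectRight_base (a : List Int) (x : Int) (lo : Nat) : bisectRight a x lo lo = lo := by
  rw [bisectRight]; simp

theorem bisect_eval (ms : Int) :
    bisectRight [110, 120, 130, 150, 180, 190, 230, 250] ms 0 8 =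
      if ms < 110 then 0 else if ms < 120 then 1 else if ms < 130 then 2 else
      if ms < 150 then 3 else if ms < 180 then 4 else if ms < 190 then 5 else
      if ms < 230 then 6 else if ms < 250 then 7 else 8 := by
  rw [bisectRight]; norm_num [List.getD]            -- (0,8): mid 4
  rw [bisectRight, bisectRight]; norm_num [List.getD]   -- (0,4),(5,8)
  rw [bisectRight, bisectRight, bisectRight, bisectRight]
  norm_num [List.getD, bisectRight_base]              -- (0,2),(3,4),(5,6),(7,8)
  rw [bisectRight]; norm_num [List.getD, bisectRight_base]  -- (0,1): mid 0
  split_ifs <;> omega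

-- ===== VERDICT (by name: the statement is the Claim_ definition above) =====
theorem map_ms_to_n_spec : Claim_equal_map_ms_to_n := by
  intro ms _
  unfold Spec_map_ms_to_n map_ms_to_n map_ms_to_n_alt
  simp only [mapMsLoop]
  rw [bisect_eval]
  split_ifs <;> simp
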